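-- pv_equiv track=rewrite | github.com/2239504-max/stockitrade-api | app/services/shinhan_event_mapper.py | _infer_currency_from_ticker_name
-- ===== SOURCE A (Python) =====
-- from typing import Any
--
-- KNOWN_CURRENCY_CODES = {
--     "KRW",
--     "USD",
--     "JPY",
--     "EUR",
--     "HKD",
--     "CNY",
--     "CNH",
--     "GBP",
--     "AUD",
--     "CAD",
--     "SGD",
--     "CHF",
--     "NZD",
-- }
--
-- def _infer_currency_from_ticker_name(value: Any) -> str | None:
--     if value in (None, ""):
--         return None
--
--     text = str(value).strip().upper()
--     for code in KNOWN_CURRENCY_CODES: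
--         if text == code or text.startswith(f"{code} "):
--             return code
--     return None
-- ===== SOURCE B (Python) =====
-- from typing import Any
--
-- KNOWN_CURRENCY_CODES = {
--     "KRW",
--     "USD",
--     "JPY",
--     "EUR",
--     "HKD",
--     "CNY",
--     "CNH",
--     "GBP",
--     "AUD",
--     "CAD",
--     "SGD",
--     "CHF",
--     "NZD",
-- }
--
-- def _infer_currency_from_ticker_name(value: Any) -> str | None:
--     if value in (None, ""):
--         return None
--     first = str(value).strip().upper().split(' ', 1)[0]
--     return first if first in KNOWN_CURRENCY_CODES else None
-- ===== Notes on version B (the rewrite author's own statement) =====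
-- stated objective: idiomatic
-- what changed: Instead of scanning all 13 codes testing equality/space-prefix for each, B extracts the first space-delimited token once with split(' ', 1) and does a single set membership lookup.
import Mathlib
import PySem

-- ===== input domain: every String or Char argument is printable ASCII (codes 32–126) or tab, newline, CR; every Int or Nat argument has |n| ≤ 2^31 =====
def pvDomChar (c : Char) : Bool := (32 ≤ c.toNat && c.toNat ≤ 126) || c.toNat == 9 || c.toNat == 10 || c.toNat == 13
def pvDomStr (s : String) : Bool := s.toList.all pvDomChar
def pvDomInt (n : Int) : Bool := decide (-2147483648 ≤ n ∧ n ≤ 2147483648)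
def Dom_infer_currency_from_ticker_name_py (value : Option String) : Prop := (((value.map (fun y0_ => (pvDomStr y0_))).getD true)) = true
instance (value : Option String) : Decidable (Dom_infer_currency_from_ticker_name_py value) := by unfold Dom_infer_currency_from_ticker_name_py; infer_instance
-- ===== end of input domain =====

-- ===== PORT A =====
-- B replaces A's per-code equality/prefix scan with one split(' ', 1) tokenization and a single set lookup.
-- KNOWN_CURRENCY_CODES: a Python set literal (PySem.Set); A iterates over it, but at most one code can
-- match a given text (all codes are distinct and space-free), so the result is iteration-order independent.
def pvKnownCodes : PySem.Set String :=
  PySem.Set.ofList ["KRW", "USD", "JPY", "EUR", "HKD", "CNY", "CNH", "GBP", "AUD", "CAD", "SGD", "CHF", "NZD"]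

-- the 'for code in KNOWN_CURRENCY_CODES' loop with its early return
def inferLoopA : String → List String → Option String
  | _, [] => none
  | text, code :: rest =>
    if text == code || PySem.Str.startswith text (code ++ " ") then some code
    else inferLoopA text rest

def infer_currency_from_ticker_name_py (value : Option String) : Option String :=
  match value with
  | none => none
  | some s =>
    if s == "" then none
    else inferLoopA (PySem.Str.upper (PySem.Str.strip s)) pvKnownCodes

-- ===== PORT B =====
def infer_currency_from_ticker_name_py_alt (value : Option String) : Option String :=
  match value with
  | none => none
  | some s =>
    if s == "" then none
    else
      -- str(value).strip().upper().split(' ', 1)[0]; the split result is always nonempty, so [0] never raises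
      let first := ((PySem.Str.splitMax? (PySem.Str.upper (PySem.Str.strip s)) " " 1).getD []).headD ""
      if PySem.Set.contains pvKnownCodes first then some first else none

-- ===== PRECONDITION & SPEC =====
def Spec_infer_currency_from_ticker_name_py (value : Option String) (out : Option String) : Prop := out = infer_currency_from_ticker_name_py_alt value
instance (value : Option String) (out : Option String) : Decidable (Spec_infer_currency_from_ticker_name_py value out) := by unfold Spec_infer_currency_from_ticker_name_py; infer_instance

-- ===== CLAIM (what is proved, stated in full; the proofs are below) =====
def Claim_equal_infer_currency_from_ticker_name_py : Prop := ∀ (value : Option String), Dom_infer_currency_from_ticker_name_py value → Spec_infer_currency_from_ticker_name_py value (infer_currency_from_ticker_name_py value)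

-- ===== LEMMAS AND PROOFS =====

-- the m = 0 continuation of the split loop just closes the current piece
lemma go_zero (sep : List Char) (fuel : Nat) (l cur : List Char) (acc : List (List Char)) :
    PySem.Chars.splitOnMax.go sep fuel 0 l cur acc = ((cur.reverse ++ l) :: acc).reverse := by
  cases fuel with
  | zero => rfl
  | succ f => cases l <;> simp [PySem.Chars.splitOnMax.go]

-- split with sep = " " and maxsplit = 1: the pieces are the first space-free token and (if a space exists) the remainder
lemma go_one (fuel : Nat) (l cur : List Char) (acc : List (List Char)) (h : l.length ≤ fuel) :
    PySem.Chars.splitOnMax.go [' '] fuel 1 l cur acc =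
      acc.reverse ++
        (if ' ' ∈ l then
          [cur.reverse ++ l.takeWhile (· ≠ ' '), (l.dropWhile (· ≠ ' ')).tail]
        else [cur.reverse ++ l]) := by
  induction fuel generalizing l cur acc with
  | zero =>
    have : l = [] := List.eq_nil_of_length_eq_zero (Nat.le_zero.mp h)
    subst this; simp [PySem.Chars.splitOnMax.go]
  | succ f ih =>
    cases l with
    | nil => simp [PySem.Chars.splitOnMax.go]
    | cons c rest =>
      by_cases hc : c = ' '
      · subst hc
        have hpre : List.isPrefixOf [' '] (' ' :: rest) = true := by simp [List.isPrefixOf]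
        simp [PySem.Chars.splitOnMax.go, hpre, go_zero, List.dropWhile]
      · have hpre : List.isPrefixOf [' '] (c :: rest) = false := by
          simp [List.isPrefixOf]; exact fun h' => hc h'.symm
        have hlen : rest.length ≤ f := by simpa using h
        rw [PySem.Chars.splitOnMax.go]
        simp only [hpre, if_neg (by omega : ¬ (1 : Nat) = 0)]
        rw [ih rest (c :: cur) acc hlen]
        simp only [List.takeWhile_cons, List.dropWhile_cons]
        by_cases hs : ' ' ∈ rest
        · simp [hs, hc]
        · simp only [hs, if_false, Bool.false_eq_true]
          simp [hc]
          exact ⟨fun h' => hc h'.symm, hs⟩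

-- first element of text.split(' ', 1): the leading space-free token
lemma split_head (t : List Char) :
    ((PySem.Chars.splitMax? t [' '] 1).getD []).headD [] = t.takeWhile (· ≠ ' ') := by
  simp only [PySem.Chars.splitMax?, List.isEmpty, PySem.Chars.splitOnMax]
  rw [if_neg (by simp), if_neg (by omega)]
  simp only [Option.getD_some, Int.toNat_one]
  rw [go_one (t.length + 1) t [] [] (by omega)]
  by_cases hs : ' ' ∈ t
  · simp [hs]
  · simp [hs]
    exact (List.takeWhile_eq_self_iff.mpr (fun x hx => by simp; rintro rfl; exact hs hx)).symm

-- a space-free block before a space is exactly what takeWhile (≠ ' ') collects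
lemma takeWhile_no_space (c r : List Char) (hsp : ' ' ∉ c) :
    (c ++ ' ' :: r).takeWhile (· ≠ ' ') = c := by
  induction c with
  | nil => simp [List.takeWhile_cons]
  | cons a as ih =>
    have ha : a ≠ ' ' := fun h => hsp (h ▸ List.mem_cons_self ..)
    rw [List.cons_append, List.takeWhile_cons, if_pos (by simpa using ha),
      ih (fun h => hsp (List.mem_cons_of_mem _ h))]

-- A's per-code test succeeds exactly when the first token IS the code (codes are nonempty and space-free)
lemma cond_iff (t c : List Char) (hne : c ≠ []) (hsp : ' ' ∉ c) :
    (t = c ∨ (c ++ [' ']) <+: t) ↔ t.takeWhile (· ≠ ' ') = c := by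
  constructor
  · rintro (rfl | ⟨r, rfl⟩)
    · exact List.takeWhile_eq_self_iff.mpr (by intro x hx; simp; rintro rfl; exact hsp hx)
    · rw [List.append_assoc, List.singleton_append]
      exact takeWhile_no_space c r hsp
  · intro h
    have hdw := List.takeWhile_append_dropWhile (p := fun x => decide (x ≠ ' ')) (l := t)
    rw [h] at hdw
    cases hd : t.dropWhile (fun x => decide (x ≠ ' ')) with
    | nil => left; rw [← hdw, hd, List.append_nil]
    | cons d r =>
      right
      have hne : t.dropWhile (fun x => decide (x ≠ ' ')) ≠ [] := by rw [hd]; simp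
      have hdf := List.head_dropWhile_not (fun x => decide (x ≠ ' ')) hne
      have hh : (t.dropWhile (fun x => decide (x ≠ ' '))).head hne = d :=
        Option.some.inj (by rw [← List.head?_eq_some_head, hd]; rfl)
      rw [hh] at hdf
      have hd' : d = ' ' := by simpa using hdf
      refine ⟨r, ?_⟩
      rw [← hdw, hd, hd']
      simp

-- the loop over the codes, characterised by the first token
lemma loopA_eq (text : String) (codes : List String)
    (hok : ∀ c ∈ codes, c.toList ≠ [] ∧ ' ' ∉ c.toList) :
    inferLoopA text codes =
      (if String.ofList (text.toList.takeWhile (· ≠ ' ')) ∈ codes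
       then some (String.ofList (text.toList.takeWhile (· ≠ ' '))) else none) := by
  induction codes with
  | nil => simp [inferLoopA]
  | cons c rest ih =>
    obtain ⟨hne, hsp⟩ := hok c (List.mem_cons_self ..)
    have hcond : (text == c || PySem.Str.startswith text (c ++ " ")) = true ↔
        text.toList.takeWhile (· ≠ ' ') = c.toList := by
      rw [Bool.or_eq_true, beq_iff_eq, PySem.Str.startswith_eq, PySem.Chars.startswith_iff,
        ← cond_iff text.toList c.toList hne hsp]
      constructor
      · rintro (rfl | h)
        · exact Or.inl rfl
        · right; rw [String.toList_append] at h; exact h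
      · rintro (h | h)
        · exact Or.inl (String.toList_inj.mp h)
        · right; rw [String.toList_append]; exact h
    simp only [inferLoopA]
    by_cases hc : (text == c || PySem.Str.startswith text (c ++ " ")) = true
    · have hft : String.ofList (text.toList.takeWhile (· ≠ ' ')) = c :=
        String.toList_inj.mp (by rw [String.toList_ofList]; exact hcond.mp hc)
      rw [if_pos hc, if_pos (by rw [List.mem_cons]; exact Or.inl hft), hft]
    · have hft : String.ofList (text.toList.takeWhile (· ≠ ' ')) ≠ c := by
        intro h
        exact hc (hcond.mpr (by rw [← h, String.toList_ofList]))
      rw [if_neg hc, ih (fun c hm => hok c (List.mem_cons_of_mem _ hm))]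
      by_cases hr : String.ofList (text.toList.takeWhile (· ≠ ' ')) ∈ rest
      · rw [if_pos hr, if_pos (List.mem_cons_of_mem _ hr)]
      · rw [if_neg hr, if_neg (by rw [List.mem_cons]; rintro (h | h); exacts [hft h, hr h])]

-- B's first token as a String
lemma first_eq (text : String) :
    ((PySem.Str.splitMax? text " " 1).getD []).headD "" =
      String.ofList (text.toList.takeWhile (· ≠ ' ')) := by
  apply String.toList_inj.mp
  rw [String.toList_ofList]
  have hb := PySem.Str.splitMax?_map text " " 1
  have hc : ((PySem.Chars.splitMax? text.toList [' '] 1).getD []).headD [] =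
      text.toList.takeWhile (· ≠ ' ') := split_head text.toList
  rw [show (" " : String).toList = [' '] from rfl] at hb
  rw [← hb] at hc
  cases hsp : PySem.Str.splitMax? text " " 1 with
  | none => rw [hsp] at hc; simpa using hc
  | some ps =>
    rw [hsp] at hc
    cases ps with
    | nil => simpa using hc
    | cons p ps' => simpa using hc

-- ===== VERDICT (by name: the statement is the Claim_ definition above) =====
theorem infer_currency_from_ticker_name_py_spec : Claim_equal_infer_currency_from_ticker_name_py := by
  intro value _
  unfold Spec_infer_currency_from_ticker_name_py
  match value with
  | none => rfl
  | some s =>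
    simp only [infer_currency_from_ticker_name_py, infer_currency_from_ticker_name_py_alt]
    by_cases h0 : (s == "") = true
    · rw [if_pos h0, if_pos h0]
    · rw [if_neg h0, if_neg h0, first_eq, loopA_eq _ _ (by decide)]
      by_cases hm : String.ofList ((PySem.Str.upper (PySem.Str.strip s)).toList.takeWhile (· ≠ ' ')) ∈ pvKnownCodes
      · rw [if_pos hm, if_pos ((PySem.Set.contains_iff _ _).mpr hm)]
      · rw [if_neg hm, if_neg (by rw [PySem.Set.contains_iff]; exact hm)]
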